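-- pv_equiv track=rewrite | github.com/Imal16/DailyByte | Problems/4 Correct Capitalization.py | correct_Capitalization
-- ===== SOURCE A (Python) =====
-- def correct_Capitalization(string):
--     upper_case_count = 0
--     upper_case_index = None
--     for i in range(len(string)):
--         if string[i] == string[i].upper():
--             upper_case_count += 1
--
--             if  upper_case_index == None :
--
--                 upper_case_index = i
--
--     if upper_case_count == 0 or (upper_case_count == 1 and upper_case_index == 0) or (upper_case_count == len(string)):
--
--         return True
--
--     else:
--         return False
-- ===== SOURCE B (Python) =====
-- def correct_Capitalization(string):
--     return all(c != c.upper() for c in string[1:]) or all(c == c.upper() for c in string)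
-- ===== Notes on version B (the rewrite author's own statement) =====
-- stated objective: simpler
-- what changed: Replaces the explicit counting loop with state (count, first-uppercase-index) and a three-way arithmetic test by two all() predicate checks over slices: no uppercase-ish char after index 0, or every char uppercase-ish.
import Mathlib
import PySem

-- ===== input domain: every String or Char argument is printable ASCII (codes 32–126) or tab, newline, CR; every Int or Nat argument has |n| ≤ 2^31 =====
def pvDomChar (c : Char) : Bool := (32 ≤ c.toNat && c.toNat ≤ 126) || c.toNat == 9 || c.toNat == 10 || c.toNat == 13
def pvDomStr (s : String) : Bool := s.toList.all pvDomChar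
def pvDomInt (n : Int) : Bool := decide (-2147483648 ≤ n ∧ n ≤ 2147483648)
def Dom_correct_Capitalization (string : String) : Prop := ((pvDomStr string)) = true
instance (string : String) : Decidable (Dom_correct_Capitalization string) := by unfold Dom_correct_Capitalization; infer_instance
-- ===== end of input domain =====

-- B replaces A's counting loop (count + first-uppercase-index state, then a three-way test) by two
-- all-checks over slices; objective: simpler. Exact equivalence, no precondition.

-- ===== PORT A =====
-- Python's `string[i] == string[i].upper()` on one character
def pvU (c : Char) : Bool := c == PySem.Chars.upperChar c

-- the for-loop over range(len(string)) with state (upper_case_count, upper_case_index),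
-- walking the characters together with their index i
def pvLoopA : List Char → Int → Int → Option Int → Int × Option Int
  | [], _, cnt, idx => (cnt, idx)
  | c :: rest, i, cnt, idx =>
    if pvU c then
      pvLoopA rest (i + 1) (cnt + 1) (if idx = none then some i else idx)
    else
      pvLoopA rest (i + 1) cnt idx

def correct_Capitalization (string : String) : Bool :=
  let r := pvLoopA string.toList 0 0 none
  if r.1 = 0 ∨ (r.1 = 1 ∧ r.2 = some 0) ∨ r.1 = (string.toList.length : Int) then
    true
  else
    false

-- ===== PORT B =====
def correct_Capitalization_alt (string : String) : Bool :=
  (PySem.List.slice string.toList (some 1) none).all (fun c => c != PySem.Chars.upperChar c)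
    || string.toList.all (fun c => c == PySem.Chars.upperChar c)

-- ===== PRECONDITION & SPEC =====
def Spec_correct_Capitalization (string : String) (out : Bool) : Prop := out = correct_Capitalization_alt string
instance (string : String) (out : Bool) : Decidable (Spec_correct_Capitalization string out) := by unfold Spec_correct_Capitalization; infer_instance

-- ===== CLAIM (what is proved, stated in full; the proofs are below) =====
def Claim_equal_correct_Capitalization : Prop := ∀ (string : String), Dom_correct_Capitalization string → Spec_correct_Capitalization string (correct_Capitalization string)

-- ===== LEMMAS AND PROOFS =====

theorem pvLoopA_some (cs : List Char) (i cnt : Int) (j : Int) :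
    pvLoopA cs i cnt (some j) = (cnt + (cs.countP pvU : Int), some j) := by
  induction cs generalizing i cnt with
  | nil => simp [pvLoopA]
  | cons c rest ih =>
    rw [pvLoopA]
    cases hu : pvU c with
    | true => simp [hu, ih]; push_cast; ring
    | false => simp [hu, ih]

theorem pvLoopA_none (cs : List Char) (i cnt : Int) :
    pvLoopA cs i cnt none =
      (cnt + (cs.countP pvU : Int), (cs.findIdx? pvU).map (fun k => i + (k : Int))) := by
  induction cs generalizing i cnt with
  | nil => simp [pvLoopA]
  | cons c rest ih =>
    rw [pvLoopA]
    cases hu : pvU c with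
    | true =>
      simp [List.findIdx?_cons, hu, pvLoopA_some]
      push_cast; ring
    | false =>
      rw [if_neg (by simp [hu]), ih]
      simp only [List.countP_cons, List.findIdx?_cons, hu, cond_false]
      refine Prod.ext ?_ ?_
      · simp
      · cases hf : rest.findIdx? pvU with
        | none => simp
        | some k => simp; push_cast; ring

theorem pvKey (cs : List Char) :
    (if ((cs.countP pvU : Int) = 0 ∨
          ((cs.countP pvU : Int) = 1 ∧
            (cs.findIdx? pvU).map (fun k => (0 : Int) + (k : Int)) = some 0) ∨
          (cs.countP pvU : Int) = (cs.length : Int))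
      then true else false)
    = ((cs.drop 1).all (fun c => c != PySem.Chars.upperChar c)
        || cs.all (fun c => c == PySem.Chars.upperChar c)) := by
  cases cs with
  | nil => simp
  | cons c rest =>
    have hcount : rest.countP pvU ≤ rest.length := List.countP_le_length
    simp only [List.drop_succ_cons, List.drop_zero, List.all_cons, List.countP_cons,
      List.findIdx?_cons, List.length_cons]
    cases hu : pvU c with
    | true =>
      have hu' : (c == PySem.Chars.upperChar c) = true := hu
      simp [hu, hu']
      have e0 : decide (((List.countP pvU rest : Int)) + 1 = 0) = false := by
        simp; omega
      have e1 : decide (∀ a ∈ rest, pvU a = false)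
          = rest.all (fun c => c != PySem.Chars.upperChar c) := by
        rw [Bool.eq_iff_iff]; simp [List.all_eq_true, pvU]
      have e2 : decide (∀ a ∈ rest, pvU a = true)
          = rest.all (fun c => c == PySem.Chars.upperChar c) := by
        rw [Bool.eq_iff_iff]; simp [List.all_eq_true, pvU]
      rw [e0, e1, e2]
      simp
    | false =>
      have hu' : (c == PySem.Chars.upperChar c) = false := hu
      simp [hu, hu']
      have e1 : decide (∀ a ∈ rest, pvU a = false)
          = rest.all (fun c => c != PySem.Chars.upperChar c) := by
        rw [Bool.eq_iff_iff]; simp [List.all_eq_true, pvU]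
      have e3 : decide ((((rest.findIdx? pvU).map (fun i => i + 1)).bind
          fun a => some ((a : Nat) : Int)) = some 0) = false := by
        cases hf : rest.findIdx? pvU with
        | none => simp
        | some k => simp; omega
      have e4 : decide ((List.countP pvU rest : Int) = (rest.length : Int) + 1) = false := by
        simp; omega
      rw [e1, e3, e4]
      simp

theorem pvSlice_one (cs : List Char) : PySem.List.slice cs (some 1) none = cs.drop 1 := by
  rw [PySem.List.slice_from_one]
  simp

-- ===== VERDICT (by name: the statement is the Claim_ definition above) =====
theorem correct_Capitalization_spec : Claim_equal_correct_Capitalization := by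
  intro s _
  unfold Spec_correct_Capitalization correct_Capitalization correct_Capitalization_alt
  rw [pvSlice_one, pvLoopA_none]
  simpa using pvKey s.toList
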